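-- pv_equiv track=rewrite | github.com/navarlu/Pepper | robot/src/bridge3.py | resolve_animation_name
-- ===== SOURCE A (Python) =====
-- def resolve_animation_name(name: str, animations_map: dict, installed: list):
--     key = str(name).strip()
--     if not key:
--         return None
--     mapped = animations_map.get(key)
--     if mapped:
--         return mapped
--     if "/" in key:
--         return key
--     suffix = "/" + key
--     matches = [b for b in installed if b.endswith(suffix)]
--     if len(matches) == 1:
--         return matches[0]
--     if len(matches) > 1:
--         pref = [m for m in matches if m.startswith("animations/")]
--         return pref[0] if pref else matches[0]
--     return None
-- ===== SOURCE B (Python) =====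
-- def resolve_animation_name(name, animations_map, installed):
--     key = str(name).strip()
--     if not key:
--         return None
--     mapped = animations_map.get(key)
--     if mapped:
--         return mapped
--     if "/" in key:
--         return key
--     return _pick("/" + key, installed)
--
--
-- def _pick(suffix, installed):
--     # single early-exit scan: first match, then lazy checks on the tail
--     for i, b in enumerate(installed):
--         if not b.endswith(suffix):
--             continue
--         rest = installed[i + 1:]
--         if not any(m.endswith(suffix) for m in rest):
--             return b
--         if b.startswith("animations/"):
--             return b
--         for m in rest:
--             if m.endswith(suffix) and m.startswith("animations/"):
--                 return m
--         return b
--     return None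
-- ===== Notes on version B (the rewrite author's own statement) =====
-- stated objective: alternative
-- what changed: Replaces the two full-list comprehensions (matches, then pref) with a single early-exiting scan that finds the first match and then lazily inspects only the tail for a second match / a preferred 'animations/' match.
import Mathlib
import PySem

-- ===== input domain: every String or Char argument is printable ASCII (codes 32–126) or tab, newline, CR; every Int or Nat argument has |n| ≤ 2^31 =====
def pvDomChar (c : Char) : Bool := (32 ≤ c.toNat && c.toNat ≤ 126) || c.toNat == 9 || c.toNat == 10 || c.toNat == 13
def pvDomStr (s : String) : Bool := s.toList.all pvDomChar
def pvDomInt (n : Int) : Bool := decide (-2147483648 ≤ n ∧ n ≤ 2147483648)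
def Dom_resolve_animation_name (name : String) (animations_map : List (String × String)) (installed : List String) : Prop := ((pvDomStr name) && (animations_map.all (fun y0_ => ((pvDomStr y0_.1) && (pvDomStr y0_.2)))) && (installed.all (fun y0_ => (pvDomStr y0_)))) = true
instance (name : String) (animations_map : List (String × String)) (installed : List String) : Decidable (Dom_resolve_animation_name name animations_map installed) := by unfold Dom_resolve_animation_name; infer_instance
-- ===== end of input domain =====

-- B replaces the two full-list comprehensions with one early-exiting scan; objective: alternative (same cost, different traversal).

-- ===== PORT A =====
-- A's tail after the key/map/'/' guards: build the full 'matches' list, then branch on its length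
def pvResolveTailA (key : String) (installed : List String) : Option String :=
  if PySem.Str.isIn "/" key then some key
  else
    let suffix := "/" ++ key
    let ms := installed.filter (fun b => PySem.Str.endswith b suffix)
    if ms.length = 1 then PySem.List.pyGet? ms 0
    else if 1 < ms.length then
      let pref := ms.filter (fun m => PySem.Str.startswith m "animations/")
      if pref ≠ [] then PySem.List.pyGet? pref 0 else PySem.List.pyGet? ms 0
    else none

def resolve_animation_name (name : String) (animations_map : List (String × String)) (installed : List String) : Option String :=
  let key := PySem.Str.strip name
  if key = "" then none
  else
    match (PySem.Dict.mk animations_map).get? key with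
    | some v => if v = "" then pvResolveTailA key installed else some v   -- 'if mapped:' — falsy for None and ""
    | none => pvResolveTailA key installed

-- ===== PORT B =====
-- first match in the tail that both ends with suffix and starts with "animations/"
def pvFindPref (suffix : String) : List String → Option String
  | [] => none
  | m :: rest =>
    if PySem.Str.endswith m suffix && PySem.Str.startswith m "animations/" then some m
    else pvFindPref suffix rest

-- B's single scan: on the first match, decide from the tail only
def pvPick (suffix : String) : List String → Option String
  | [] => none
  | b :: rest =>
    if PySem.Str.endswith b suffix then
      if !(rest.any (fun m => PySem.Str.endswith m suffix)) then some b
      else if PySem.Str.startswith b "animations/" then some b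
      else
        match pvFindPref suffix rest with
        | some m => some m
        | none => some b
    else pvPick suffix rest

def resolve_animation_name_alt (name : String) (animations_map : List (String × String)) (installed : List String) : Option String :=
  let key := PySem.Str.strip name
  if key = "" then none
  else
    match (PySem.Dict.mk animations_map).get? key with
    | some v => if v = "" then (if PySem.Str.isIn "/" key then some key else pvPick ("/" ++ key) installed) else some v
    | none => if PySem.Str.isIn "/" key then some key else pvPick ("/" ++ key) installed

-- ===== PRECONDITION & SPEC =====
def Spec_resolve_animation_name (name : String) (animations_map : List (String × String)) (installed : List String) (out : Option String) : Prop := out = resolve_animation_name_alt name animations_map installed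
instance (name : String) (animations_map : List (String × String)) (installed : List String) (out : Option String) : Decidable (Spec_resolve_animation_name name animations_map installed out) := by unfold Spec_resolve_animation_name; infer_instance

-- ===== CLAIM (what is proved, stated in full; the proofs are below) =====
def Claim_equal_resolve_animation_name : Prop := ∀ (name : String) (animations_map : List (String × String)) (installed : List String), Dom_resolve_animation_name name animations_map installed → Spec_resolve_animation_name name animations_map installed (resolve_animation_name name animations_map installed)

-- ===== LEMMAS AND PROOFS =====

lemma pvFindPref_eq (suffix : String) (l : List String) :
    pvFindPref suffix l =
      ((l.filter (fun b => PySem.Str.endswith b suffix)).filter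
        (fun m => PySem.Str.startswith m "animations/")).head? := by
  induction l with
  | nil => rfl
  | cons b rest ih =>
    by_cases he : PySem.Str.endswith b suffix = true <;>
      by_cases hs : PySem.Str.startswith b "animations/" = true <;>
      simp at he hs <;>
      simp [pvFindPref, he, hs, ih]

lemma pvPick_eq (suffix : String) (l : List String) :
    pvPick suffix l =
      (let ms := l.filter (fun b => PySem.Str.endswith b suffix)
       if ms.length = 1 then PySem.List.pyGet? ms 0
       else if 1 < ms.length then
         let pref := ms.filter (fun m => PySem.Str.startswith m "animations/")
         if pref ≠ [] then PySem.List.pyGet? pref 0 else PySem.List.pyGet? ms 0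
       else none) := by
  induction l with
  | nil => rfl
  | cons b rest ih =>
    show _ = (let ms := (b :: rest).filter (fun b => PySem.Str.endswith b suffix); _)
    by_cases he : PySem.Str.endswith b suffix = true
    · by_cases ha : rest.any (fun m => PySem.Str.endswith m suffix) = true
      · have hne : rest.filter (fun m => PySem.Str.endswith m suffix) ≠ [] := by
          simp only [ne_eq, List.filter_eq_nil_iff]
          simp only [List.any_eq_true] at ha
          push Not
          exact ha
        cases hr : rest.filter (fun m => PySem.Str.endswith m suffix) with
        | nil => exact absurd hr hne
        | cons x xs =>
          have hms : (b :: rest).filter (fun b => PySem.Str.endswith b suffix)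
              = b :: x :: xs := by
            rw [List.filter_cons, if_pos he, hr]
          simp only [pvPick, he, ha, Bool.not_true, Bool.false_eq_true, if_false, if_true, hms,
            List.length_cons]
          rw [if_neg (show ¬(xs.length + 1 + 1 = 1) by omega),
            if_pos (show 1 < xs.length + 1 + 1 by omega)]
          by_cases hs : PySem.Str.startswith b "animations/" = true
          · rw [if_pos hs, List.filter_cons, if_pos hs,
              if_pos (by simp), PySem.List.pyGet?_zero_cons]
          · rw [if_neg hs, List.filter_cons, if_neg hs, pvFindPref_eq, hr]
            cases hp : (x :: xs).filter (fun m => PySem.Str.startswith m "animations/") with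
            | nil =>
              rw [if_neg (by simp), PySem.List.pyGet?_zero_cons]
              rfl
            | cons p ps =>
              rw [if_pos (by simp), PySem.List.pyGet?_zero_cons]
              rfl
      · have hnil : rest.filter (fun m => PySem.Str.endswith m suffix) = [] := by
          have ha' : rest.any (fun m => PySem.Str.endswith m suffix) = false :=
            Bool.eq_false_iff.mpr ha
          simp only [List.any_eq_false] at ha'
          exact List.filter_eq_nil_iff.mpr ha'
        have ha' : rest.any (fun m => PySem.Str.endswith m suffix) = false :=
          Bool.eq_false_iff.mpr ha
        have hms : (b :: rest).filter (fun b => PySem.Str.endswith b suffix) = [b] := by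
          rw [List.filter_cons, if_pos he, hnil]
        simp only [pvPick, he, ha', Bool.not_false, if_true, hms, List.length_cons,
          List.length_nil]
        rw [PySem.List.pyGet?_zero_cons]
    · have he' : PySem.Str.endswith b suffix = false := by simpa using he
      simp only [pvPick, he', Bool.false_eq_true, if_false, ih, List.filter_cons]

lemma pvTail_eq (key : String) (installed : List String) :
    pvResolveTailA key installed =
      (if PySem.Str.isIn "/" key then some key else pvPick ("/" ++ key) installed) := by
  unfold pvResolveTailA
  by_cases h : PySem.Str.isIn "/" key = true
  · rw [if_pos h, if_pos h]
  · rw [if_neg h, if_neg h, pvPick_eq]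

-- ===== VERDICT (by name: the statement is the Claim_ definition above) =====
theorem resolve_animation_name_spec : Claim_equal_resolve_animation_name := by
  intro name animations_map installed _
  unfold Spec_resolve_animation_name resolve_animation_name resolve_animation_name_alt
  cases h : (PySem.Dict.mk animations_map).get? (PySem.Str.strip name) with
  | none => simp [h, pvTail_eq]
  | some v => simp [h, pvTail_eq]
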